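-- pv_equiv track=rewrite | github.com/beachspainc/SimplyBookEnhancement | tools/ads_csv_to_json.py | bucket_of
-- ===== SOURCE A (Python) =====
-- from typing import Dict, List
--
-- ADS_KEYS = {
--     "Headline 1", "Headline 2", "Headline 3", "Headline 4", "Headline 5",
--     "Headline 6", "Headline 7", "Headline 8", "Headline 9", "Headline 10",
--     "Headline 11", "Headline 12", "Headline 13", "Headline 14", "Headline 15",
--     "Description 1", "Description 2", "Description 3", "Description 4",
--     "Image name", "Video ID 1", "Video ID 2", "Video ID 3", "Video ID 4",
--     "Video ID 5", "Path 1", "Path 2"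
-- }
--
-- EXT_KEYS = {
--     "Link Text", "Callout text", "Snippet Values",
--     "Percent discount", "Phone Number"
-- }
--
-- CRI_KEYS = {
--     "Keyword", "Location", "Audience name", "Audience segment",
--     "Ad Schedule", "Device", "Age", "Gender", "Household income", "Radius"
-- }
--
-- def bucket_of(row: Dict[str, str]) -> str:
--     """Return one of: ads / extensions / criteria / settings."""
--     keys = {k for k, v in row.items() if v}
--     if keys & ADS_KEYS:
--         return "ads"
--     if keys & EXT_KEYS:
--         return "extensions"
--     if keys & CRI_KEYS:
--         return "criteria"
--     return "settings"
-- ===== SOURCE B (Python) =====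
-- ADS_KEYS = {
--     "Headline 1", "Headline 2", "Headline 3", "Headline 4", "Headline 5",
--     "Headline 6", "Headline 7", "Headline 8", "Headline 9", "Headline 10",
--     "Headline 11", "Headline 12", "Headline 13", "Headline 14", "Headline 15",
--     "Description 1", "Description 2", "Description 3", "Description 4",
--     "Image name", "Video ID 1", "Video ID 2", "Video ID 3", "Video ID 4",
--     "Video ID 5", "Path 1", "Path 2"
-- }
--
-- EXT_KEYS = {
--     "Link Text", "Callout text", "Snippet Values",
--     "Percent discount", "Phone Number"
-- }
--
-- CRI_KEYS = {
--     "Keyword", "Location", "Audience name", "Audience segment",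
--     "Ad Schedule", "Device", "Age", "Gender", "Household income", "Radius"
-- }
--
-- _LABELS = ("ads", "extensions", "criteria", "settings")
--
-- def bucket_of(row):
--     """Return one of: ads / extensions / criteria / settings."""
--     best = 3
--     for k, v in row.items():
--         if v:
--             if k in ADS_KEYS:
--                 r = 0
--             elif k in EXT_KEYS:
--                 r = 1
--             elif k in CRI_KEYS:
--                 r = 2
--             else:
--                 r = 3
--             if r < best:
--                 best = r
--     return _LABELS[best]
-- ===== Notes on version B (the rewrite author's own statement) =====
-- stated objective: alternative
-- what changed: Instead of materialising the set of truthy keys and testing three set intersections in priority order, B makes a single pass over row.items(), mapping each truthy key to a priority rank (0=ads,1=extensions,2=criteria,3=settings), keeps the minimum rank, and indexes a label tuple with it.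
import Mathlib
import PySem

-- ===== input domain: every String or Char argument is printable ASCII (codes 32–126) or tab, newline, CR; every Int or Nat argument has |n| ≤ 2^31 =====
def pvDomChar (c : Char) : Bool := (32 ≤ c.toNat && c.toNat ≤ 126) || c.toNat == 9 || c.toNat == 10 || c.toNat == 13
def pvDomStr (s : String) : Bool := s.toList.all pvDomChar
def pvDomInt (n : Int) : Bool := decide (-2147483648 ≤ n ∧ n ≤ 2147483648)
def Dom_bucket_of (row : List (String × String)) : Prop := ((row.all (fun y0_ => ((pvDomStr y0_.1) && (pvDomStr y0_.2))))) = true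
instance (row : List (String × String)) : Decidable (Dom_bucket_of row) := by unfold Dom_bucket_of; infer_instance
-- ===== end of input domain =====

-- B replaces the three set-intersection tests with one pass keeping the minimum priority rank of a truthy key: alternative decomposition, same cost.

def pvADS : PySem.Set String := PySem.Set.ofList
  ["Headline 1", "Headline 2", "Headline 3", "Headline 4", "Headline 5",
   "Headline 6", "Headline 7", "Headline 8", "Headline 9", "Headline 10",
   "Headline 11", "Headline 12", "Headline 13", "Headline 14", "Headline 15",
   "Description 1", "Description 2", "Description 3", "Description 4",
   "Image name", "Video ID 1", "Video ID 2", "Video ID 3", "Video ID 4",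
   "Video ID 5", "Path 1", "Path 2"]

def pvEXT : PySem.Set String := PySem.Set.ofList
  ["Link Text", "Callout text", "Snippet Values", "Percent discount", "Phone Number"]

def pvCRI : PySem.Set String := PySem.Set.ofList
  ["Keyword", "Location", "Audience name", "Audience segment",
   "Ad Schedule", "Device", "Age", "Gender", "Household income", "Radius"]

-- ===== PORT A =====
def bucket_of (row : List (String × String)) : String :=
  let keys : PySem.Set String :=
    PySem.Set.ofList ((row.filter (fun kv => kv.2 != "")).map Prod.fst)
  if PySem.Set.inter keys pvADS ≠ [] then "ads"
  else if PySem.Set.inter keys pvEXT ≠ [] then "extensions"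
  else if PySem.Set.inter keys pvCRI ≠ [] then "criteria"
  else "settings"

-- ===== PORT B =====
def pvRank (k : String) : Nat :=
  if pvADS.contains k then 0
  else if pvEXT.contains k then 1
  else if pvCRI.contains k then 2
  else 3

def bucket_of_alt (row : List (String × String)) : String :=
  let best := row.foldl (fun b kv => if kv.2 != "" then if pvRank kv.1 < b then pvRank kv.1 else b else b) 3
  if best = 0 then "ads"
  else if best = 1 then "extensions"
  else if best = 2 then "criteria"
  else "settings"

-- ===== PRECONDITION & SPEC =====
def Spec_bucket_of (row : List (String × String)) (out : String) : Prop := out = bucket_of_alt row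
instance (row : List (String × String)) (out : String) : Decidable (Spec_bucket_of row out) := by unfold Spec_bucket_of; infer_instance

-- ===== CLAIM (what is proved, stated in full; the proofs are below) =====
def Claim_equal_bucket_of : Prop := ∀ (row : List (String × String)), Dom_bucket_of row → Spec_bucket_of row (bucket_of row)

-- ===== LEMMAS AND PROOFS =====

-- hit S row : some entry of row has a truthy value and a key in S
def pvHit (S : PySem.Set String) (row : List (String × String)) : Bool :=
  row.any (fun kv => kv.2 != "" && S.contains kv.1)

def pvBest (row : List (String × String)) : Nat :=
  if pvHit pvADS row then 0 else if pvHit pvEXT row then 1 else if pvHit pvCRI row then 2 else 3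

theorem pv_ne_nil_iff {α : Type} (l : List α) : l ≠ [] ↔ ∃ x, x ∈ l := by
  cases l <;> simp

theorem pv_inter_ne_nil (S : PySem.Set String) (row : List (String × String)) :
    (PySem.Set.inter (PySem.Set.ofList ((row.filter (fun kv => kv.2 != "")).map Prod.fst)) S ≠ []) ↔ pvHit S row = true := by
  rw [pv_ne_nil_iff]
  simp only [pvHit, PySem.Set.mem_inter, PySem.Set.mem_ofList, List.mem_map, List.mem_filter,
        List.any_eq_true, Bool.and_eq_true, PySem.Set.contains_iff]
  constructor
  · rintro ⟨x, ⟨kv, ⟨hmem, ht⟩, rfl⟩, hS⟩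
    exact ⟨kv, hmem, ht, by simpa using hS⟩
  · rintro ⟨kv, hmem, ht, hS⟩
    exact ⟨kv.1, ⟨kv, ⟨hmem, ht⟩, rfl⟩, by simpa using hS⟩

-- the cons step of the minimum-rank recurrence, as a pure Bool/Nat fact
theorem pv_min_lemma (A1 E1 C1 HA HE HC : Bool) :
    (if (A1 || HA) then 0 else if (E1 || HE) then 1 else if (C1 || HC) then (2:Nat) else 3)
      = min (if A1 then 0 else if E1 then 1 else if C1 then 2 else 3)
            (if HA then 0 else if HE then 1 else if HC then 2 else 3) := by
  cases A1 <;> cases E1 <;> cases C1 <;> cases HA <;> cases HE <;> cases HC <;> decide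

theorem pv_fold_eq (row : List (String × String)) :
    ∀ b : Nat, b ≤ 3 → row.foldl (fun b kv => if kv.2 != "" then if pvRank kv.1 < b then pvRank kv.1 else b else b) b
      = min b (pvBest row) := by
  induction row with
  | nil =>
    intro b hb
    simp only [List.foldl_nil, pvBest, pvHit, List.any_nil]
    simp
    omega
  | cons kv rest ih =>
    intro b hb
    by_cases ht : (kv.2 != "") = true
    · have hcons : pvBest (kv :: rest) = min (pvRank kv.1) (pvBest rest) := by
        unfold pvBest pvRank
        simp only [pvHit, List.any_cons, ht, Bool.true_and]
        exact pv_min_lemma _ _ _ _ _ _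
      have hstep : (if pvRank kv.1 < b then pvRank kv.1 else b) ≤ 3 := by
        split_ifs <;> omega
      simp only [List.foldl_cons, ht, if_true, ih _ hstep, hcons]
      split_ifs <;> omega
    · have hcons : pvBest (kv :: rest) = pvBest rest := by
        unfold pvBest
        rw [Bool.not_eq_true] at ht
        simp only [pvHit, List.any_cons, ht, Bool.false_and, Bool.false_or]
        rfl
      simp only [List.foldl_cons, ht, if_false, Bool.false_eq_true] at *
      rw [ih _ hb, hcons]

-- ===== VERDICT (by name: the statement is the Claim_ definition above) =====
theorem bucket_of_spec : Claim_equal_bucket_of := by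
  intro row _
  unfold Spec_bucket_of bucket_of bucket_of_alt
  rw [pv_fold_eq row 3 (by omega)]
  have h3 : pvBest row ≤ 3 := by unfold pvBest; split_ifs <;> omega
  have hmin : min 3 (pvBest row) = pvBest row := by omega
  rw [hmin]
  simp only [pv_inter_ne_nil]
  unfold pvBest
  by_cases hA : pvHit pvADS row = true
  · simp [hA]
  · by_cases hE : pvHit pvEXT row = true
    · simp [hA, hE]
    · by_cases hC : pvHit pvCRI row = true
      · simp [hA, hE, hC]
      · simp [hA, hE, hC]
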